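-- pv_equiv track=rewrite | github.com/MaseraTiGo/4U | codes/algorithm/trees.py | can_be_palindromic
-- ===== SOURCE A (Python) =====
-- def can_be_palindromic(path):
--     mapping = {}
--     for item in path:
--         if item not in mapping:
--             mapping[item] = 1
--         else:
--             mapping[item] += 1
--     if len(mapping) == 1:
--         return True
--     odd_nums = 0
--     for value in mapping.values():
--         if value % 2:
--             odd_nums += 1
--             if odd_nums > 1:
--                 return False
--     return True
-- ===== SOURCE B (Python) =====
-- def can_be_palindromic(path):
--     odd = set()
--     for item in path:
--         if item in odd:
--             odd.discard(item)
--         else: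
--             odd.add(item)
--     return len(odd) <= 1
-- ===== Notes on version B (the rewrite author's own statement) =====
-- stated objective: idiomatic
-- what changed: Replaces the frequency dict plus a second parity-counting loop (and a len==1 special case) with one toggling pass over a set of odd-count items, returning len(odd) <= 1.
import Mathlib
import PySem

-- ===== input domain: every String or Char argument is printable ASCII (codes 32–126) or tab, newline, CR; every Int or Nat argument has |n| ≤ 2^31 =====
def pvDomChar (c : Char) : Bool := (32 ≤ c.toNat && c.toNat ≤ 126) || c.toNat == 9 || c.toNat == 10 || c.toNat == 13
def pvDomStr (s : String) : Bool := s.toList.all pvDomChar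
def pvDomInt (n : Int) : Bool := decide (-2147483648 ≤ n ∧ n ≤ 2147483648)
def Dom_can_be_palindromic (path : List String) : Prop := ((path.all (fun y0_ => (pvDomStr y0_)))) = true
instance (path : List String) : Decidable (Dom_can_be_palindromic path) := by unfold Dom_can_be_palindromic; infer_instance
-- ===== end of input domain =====

-- B replaces A's frequency dict plus second parity loop by a single toggling pass over a set (idiomatic; same cost).

-- ===== PORT A =====
-- the second loop of A ('for value in mapping.values(): …' with its early return False)
def oddLoopA : List Int → Int → Bool
  | [], _ => true
  | v :: rest, odd_nums =>
    if PySem.Int.mod v 2 ≠ 0 then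
      if odd_nums + 1 > 1 then false else oddLoopA rest (odd_nums + 1)
    else oddLoopA rest odd_nums

def can_be_palindromic (path : List String) : Bool :=
  let mapping := path.foldl (fun d item =>
    if d.contains item = false then d.insert item (1 : Int)
    else d.insert item (d.getD item 0 + 1)) PySem.Dict.empty
  if mapping.size = 1 then true
  else oddLoopA mapping.values 0

-- ===== PORT B =====
def can_be_palindromic_alt (path : List String) : Bool :=
  let odd : PySem.Set String := path.foldl (fun s item =>
    if PySem.Set.contains s item then PySem.Set.discard s item
    else PySem.Set.add s item) PySem.Set.empty
  decide (PySem.Set.len odd ≤ 1)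

-- ===== PRECONDITION & SPEC =====
def Spec_can_be_palindromic (path : List String) (out : Bool) : Prop := out = can_be_palindromic_alt path
instance (path : List String) (out : Bool) : Decidable (Spec_can_be_palindromic path out) := by unfold Spec_can_be_palindromic; infer_instance

-- ===== CLAIM (what is proved, stated in full; the proofs are below) =====
def Claim_equal_can_be_palindromic : Prop := ∀ (path : List String), Dom_can_be_palindromic path → Spec_can_be_palindromic path (can_be_palindromic path)

-- ===== LEMMAS AND PROOFS =====

-- A's dict-building loop is Counter(path)
lemma mapping_eq_counter (path : List String) :
    path.foldl (fun d item =>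
      if d.contains item = false then d.insert item (1 : Int)
      else d.insert item (d.getD item 0 + 1)) PySem.Dict.empty
    = PySem.Dict.counter path := by
  rw [← PySem.Dict.foldl_insert_getD_add_one_eq_counter]
  apply List.foldl_ext
  intro d x _
  by_cases h : d.contains x = false
  · rw [if_pos h, PySem.Dict.getD_of_not_contains d 0 h]
    norm_num
  · rw [if_neg h]

-- A's second loop counts odd values with an early exit at 2
lemma oddLoopA_spec (vs : List Int) (c : Int) (h0 : 0 ≤ c) (h1 : c ≤ 1) :
    oddLoopA vs c = decide ((vs.countP (fun v => decide (PySem.Int.mod v 2 ≠ 0)) : Int) + c ≤ 1) := by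
  induction vs generalizing c with
  | nil =>
    show true = _
    symm; rw [decide_eq_true_iff]; simp; omega
  | cons v rest ih =>
    rw [oddLoopA]
    by_cases hv : PySem.Int.mod v 2 ≠ 0
    · rw [if_pos hv, List.countP_cons_of_pos (by simpa using hv)]
      by_cases hc : c = 1
      · subst hc
        rw [if_pos (by omega)]
        symm; rw [decide_eq_false_iff_not]
        push_cast; omega
      · have hc0 : c = 0 := by omega
        subst hc0
        rw [if_neg (by omega), show (0:Int) + 1 = 1 by norm_num,
          ih 1 (by omega) (by omega), decide_eq_decide]
        push_cast; omega
    · rw [if_neg hv, List.countP_cons_of_neg (by simpa using hv), ih c h0 h1]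

-- B's toggle-set invariant: the result is duplicate-free and holds exactly the
-- elements whose count in the processed list flips the parity of their membership in s
lemma toggle_inv (path : List String) (s : PySem.Set String) (hnd : s.Nodup) :
    (path.foldl (fun s item =>
      if PySem.Set.contains s item then PySem.Set.discard s item
      else PySem.Set.add s item) s).Nodup ∧
    (∀ x, x ∈ (path.foldl (fun s item =>
      if PySem.Set.contains s item then PySem.Set.discard s item
      else PySem.Set.add s item) s) ↔ ((x ∈ s) ↔ 2 ∣ path.count x)) := by
  induction path generalizing s with
  | nil => exact ⟨hnd, fun x => by simp⟩
  | cons a rest ih =>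
    by_cases ha : a ∈ s
    · have hc : PySem.Set.contains s a = true := (PySem.Set.contains_iff s a).mpr ha
      simp only [List.foldl_cons, hc, if_true]
      obtain ⟨nd', mem'⟩ := ih (PySem.Set.discard s a) (PySem.Set.nodup_discard s a hnd)
      refine ⟨nd', fun x => ?_⟩
      rw [mem' x, PySem.Set.mem_discard, List.count_cons]
      by_cases hx : x = a
      · subst hx
        simp [ha]
        omega
      · have hxa : ¬ a = x := fun h => hx h.symm
        simp [hx, hxa]
    · have hc : PySem.Set.contains s a = false := by
        rw [Bool.eq_false_iff]
        intro h; exact ha ((PySem.Set.contains_iff s a).mp h)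
      simp only [List.foldl_cons, hc, Bool.false_eq_true, if_false]
      obtain ⟨nd', mem'⟩ := ih (PySem.Set.add s a) (PySem.Set.nodup_add s a hnd)
      refine ⟨nd', fun x => ?_⟩
      rw [mem' x, PySem.Set.mem_add, List.count_cons]
      by_cases hx : x = a
      · subst hx
        simp [ha]
        omega
      · have hxa : ¬ a = x := fun h => hx h.symm
        simp [hx, hxa]

-- the number of distinct elements of path with odd count
def oddCnt (path : List String) : Nat :=
  (PySem.Set.ofList path).countP (fun k => decide (¬ 2 ∣ path.count k))

lemma toggle_len (path : List String) :
    PySem.Set.len (path.foldl (fun s item =>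
      if PySem.Set.contains s item then PySem.Set.discard s item
      else PySem.Set.add s item) PySem.Set.empty) = oddCnt path := by
  obtain ⟨hnd, hmem⟩ := toggle_inv path PySem.Set.empty List.nodup_nil
  set t := path.foldl (fun s item =>
      if PySem.Set.contains s item then PySem.Set.discard s item
      else PySem.Set.add s item) PySem.Set.empty with ht
  have hmem' : ∀ x, x ∈ t ↔ (x ∈ path ∧ ¬ 2 ∣ path.count x) := by
    intro x
    rw [hmem x]
    have he : (x ∈ PySem.Set.empty) = False := by simp [PySem.Set.empty]
    rw [he, false_iff]
    constructor
    · intro h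
      refine ⟨?_, h⟩
      by_contra hx
      exact h (by simp [List.count_eq_zero_of_not_mem hx])
    · exact fun h => h.2
  have hperm : t.Perm ((PySem.Set.ofList path).filter (fun k => decide (¬ 2 ∣ path.count k))) := by
    rw [List.perm_ext_iff_of_nodup hnd ((PySem.Set.nodup_ofList path).filter _)]
    intro x
    rw [hmem' x]
    simp [List.mem_filter, PySem.Set.mem_ofList]
  have hlen := hperm.length_eq
  simpa [PySem.Set.len, oddCnt, List.countP_eq_length_filter] using hlen

-- A's values list: countP of odd values over Counter(path).values is oddCnt
lemma countP_values (path : List String) :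
    (PySem.Dict.counter path).values.countP (fun v => decide (PySem.Int.mod v 2 ≠ 0)) = oddCnt path := by
  have hv : (PySem.Dict.counter path).values
      = (PySem.Set.ofList path).map (fun k => ((path.count k : Nat) : Int)) := by
    show ((PySem.Dict.counter path).items).map (·.2) = _
    rw [PySem.Dict.items_counter]
    simp
  rw [hv, List.countP_map, oddCnt]
  apply List.countP_congr
  intro k _
  simp only [Function.comp, decide_eq_true_eq]
  constructor <;> intro h <;> [skip; skip] <;> (revert h; simp; omega)

lemma size_counter (path : List String) :
    (PySem.Dict.counter path).size = (PySem.Set.ofList path).length := by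
  show ((PySem.Dict.counter path).items).length = _
  rw [PySem.Dict.items_counter]; simp

-- ===== VERDICT (by name: the statement is the Claim_ definition above) =====
theorem can_be_palindromic_spec : Claim_equal_can_be_palindromic := by
  intro path _
  show can_be_palindromic path = can_be_palindromic_alt path
  show (if (path.foldl (fun d item =>
      if d.contains item = false then d.insert item (1 : Int)
      else d.insert item (d.getD item 0 + 1)) PySem.Dict.empty).size = 1 then true
    else oddLoopA (path.foldl (fun d item =>
      if d.contains item = false then d.insert item (1 : Int)
      else d.insert item (d.getD item 0 + 1)) PySem.Dict.empty).values 0)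
    = decide (PySem.Set.len (path.foldl (fun s item =>
      if PySem.Set.contains s item then PySem.Set.discard s item
      else PySem.Set.add s item) PySem.Set.empty) ≤ 1)
  rw [mapping_eq_counter, toggle_len]
  rw [oddLoopA_spec _ 0 (by omega) (by omega), countP_values]
  by_cases h : (PySem.Dict.counter path).size = 1
  · have hle : oddCnt path ≤ 1 := by
      have h1 := List.countP_le_length (p := fun k => decide (¬ 2 ∣ path.count k))
        (l := PySem.Set.ofList path)
      have h2 := size_counter path
      unfold oddCnt
      omega
    rw [if_pos h]
    symm; rw [decide_eq_true_iff]
    omega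
  · rw [if_neg h, decide_eq_decide]
    omega
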